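-- pv_equiv track=rewrite | github.com/nivi1412/dsa | math10.py | combinationlessthan
-- ===== SOURCE A (Python) =====
-- def combinationlessthan(A,i,C_digit,C):
-- 	count=[]
-- 	loopcount1=0
-- 	loopcount2=1
-- 	original,_=numdigits(C)
-- 	if original == len(C_digit):
-- 		flag=True
-- 	else:
-- 		flag=False
-- 	while(i>=0):
-- 		if i==len(C_digit)-1:
-- 			for j in A:
-- 				if j<C_digit[i] and j!=0 and flag:	# j!=0 only for first digit
-- 					loopcount1+=1
-- 				elif j<C_digit[i] and not(flag):
-- 					loopcount1+=1
--
-- 			count.append(loopcount1)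
-- 		else:
-- 			count.append(len(A))
--
-- 		i-=1
-- 	if len(count) > 0:
-- 		for k in range(0,len(count),+1):
-- 			loopcount2=loopcount2*count[k]
-- 		return loopcount2
-- 	else:
-- 		return 0
--
-- def numdigits(C):
-- 	digit=[]
-- 	count=0
-- 	while(C>0):
-- 		digit.append(C%10)
-- 		C=C//10
-- 		count+=1
-- 	return(count,digit)
-- ===== SOURCE B (Python) =====
-- def combinationlessthan(A, i, C_digit, C):
--     if i < 0:
--         return 0
--     # number of decimal digits of C (0 for C <= 0)
--     n = 0
--     c = C
--     while c > 0:
--         c //= 10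
--         n += 1
--     flag = (n == len(C_digit))
--     L = len(C_digit)
--     if 0 <= L - 1 <= i:
--         cnt = sum(1 for j in A if j < C_digit[L - 1] and (j != 0 or not flag))
--         return cnt * len(A) ** i
--     return len(A) ** (i + 1)
-- ===== Notes on version B (the rewrite author's own statement) =====
-- stated objective: simpler
-- what changed: Replaces A's while-loop that builds a per-position count list and the second loop that multiplies it up with a closed form: one count of qualifying digits times len(A)**i (or len(A)**(i+1) when no position coincides with the last digit).
import Mathlib
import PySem

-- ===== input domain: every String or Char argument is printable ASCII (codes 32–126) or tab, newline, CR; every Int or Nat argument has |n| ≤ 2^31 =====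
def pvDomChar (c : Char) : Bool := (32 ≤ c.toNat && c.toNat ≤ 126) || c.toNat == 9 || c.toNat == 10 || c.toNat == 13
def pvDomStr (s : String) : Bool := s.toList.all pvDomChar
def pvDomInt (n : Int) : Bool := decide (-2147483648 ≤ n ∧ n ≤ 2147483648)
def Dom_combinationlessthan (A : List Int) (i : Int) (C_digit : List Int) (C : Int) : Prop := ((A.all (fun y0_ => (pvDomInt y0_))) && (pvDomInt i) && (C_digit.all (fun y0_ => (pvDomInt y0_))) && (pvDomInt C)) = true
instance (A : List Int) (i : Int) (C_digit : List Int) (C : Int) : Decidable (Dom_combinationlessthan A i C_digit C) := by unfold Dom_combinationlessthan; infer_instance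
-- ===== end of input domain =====

-- B replaces A's per-position count list and product loop by a closed form (one count times a power); simpler.

-- ===== PORT A =====
-- numdigits(C): while C>0: digit.append(C%10); C//=10; count+=1
def numdigitsAux (C : Int) (digit : List Int) (count : Int) : Int × List Int :=
  if h : C > 0 then
    numdigitsAux (PySem.Int.floordiv C 10) (digit ++ [PySem.Int.mod C 10]) (count + 1)
  else (count, digit)
termination_by C.toNat
decreasing_by
  have h10 : PySem.Int.floordiv C 10 = C / 10 := PySem.Int.floordiv_eq_ediv_of_pos (by omega)
  rw [h10]; omega

def numdigits (C : Int) : Int × List Int := numdigitsAux C [] 0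

-- the while(i>=0) loop of A: state (count, loopcount1); C_digit[i] is read via pyGet?
-- (in range whenever the branch fires, since i = len(C_digit)-1 ≥ 0 there; getD 0 is never the raising case)
def clessAux (A : List Int) (C_digit : List Int) (flag : Bool) (i : Int)
    (count : List Int) (loopcount1 : Int) : List Int × Int :=
  if _h : i ≥ 0 then
    if i = (C_digit.length : Int) - 1 then
      let lc := A.foldl (fun acc j =>
        if j < (PySem.List.pyGet? C_digit i).getD 0 ∧ j ≠ 0 ∧ flag = true then acc + 1
        else if j < (PySem.List.pyGet? C_digit i).getD 0 ∧ ¬ flag = true then acc + 1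
        else acc) loopcount1
      clessAux A C_digit flag (i - 1) (count ++ [lc]) lc
    else
      clessAux A C_digit flag (i - 1) (count ++ [(A.length : Int)]) loopcount1
  else (count, loopcount1)
termination_by (i + 1).toNat
decreasing_by all_goals omega

def combinationlessthan (A : List Int) (i : Int) (C_digit : List Int) (C : Int) : Int :=
  let original := (numdigits C).1
  let flag : Bool := original = (C_digit.length : Int)
  let st := clessAux A C_digit flag i [] 0
  if st.1.length > 0 then st.1.foldl (fun acc k => acc * k) 1
  else 0

-- ===== PORT B =====
-- digit-count loop of Source B: while c>0: c//=10; n+=1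
def countDigitsB (c : Int) (n : Int) : Int :=
  if h : c > 0 then countDigitsB (PySem.Int.floordiv c 10) (n + 1) else n
termination_by c.toNat
decreasing_by
  have h10 : PySem.Int.floordiv c 10 = c / 10 := PySem.Int.floordiv_eq_ediv_of_pos (by omega)
  rw [h10]; omega

def combinationlessthan_alt (A : List Int) (i : Int) (C_digit : List Int) (C : Int) : Int :=
  if i < 0 then 0
  else
    let n := countDigitsB C 0
    let flag : Bool := n = (C_digit.length : Int)
    let L : Int := (C_digit.length : Int)
    if 0 ≤ L - 1 ∧ L - 1 ≤ i then
      let cnt : Int := A.countP (fun j =>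
        decide (j < (PySem.List.pyGet? C_digit (L - 1)).getD 0 ∧ (j ≠ 0 ∨ ¬ flag = true)))
      cnt * (A.length : Int) ^ i.toNat
    else (A.length : Int) ^ (i + 1).toNat

-- ===== PRECONDITION & SPEC =====
def Spec_combinationlessthan (A : List Int) (i : Int) (C_digit : List Int) (C : Int) (out : Int) : Prop := out = combinationlessthan_alt A i C_digit C
instance (A : List Int) (i : Int) (C_digit : List Int) (C : Int) (out : Int) : Decidable (Spec_combinationlessthan A i C_digit C out) := by unfold Spec_combinationlessthan; infer_instance

-- ===== CLAIM (what is proved, stated in full; the proofs are below) =====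
def Claim_equal_combinationlessthan : Prop := ∀ (A : List Int) (i : Int) (C_digit : List Int) (C : Int), Dom_combinationlessthan A i C_digit C → Spec_combinationlessthan A i C_digit C (combinationlessthan A i C_digit C)

-- ===== LEMMAS AND PROOFS =====

theorem numdigitsAux_fst (C : Int) (digit : List Int) (n : Int) :
    (numdigitsAux C digit n).1 = countDigitsB C n := by
  unfold numdigitsAux countDigitsB
  split_ifs with h
  · exact numdigitsAux_fst (PySem.Int.floordiv C 10) (digit ++ [PySem.Int.mod C 10]) (n + 1)
  · rfl
termination_by C.toNat
decreasing_by
  have h10 : PySem.Int.floordiv C 10 = C / 10 := PySem.Int.floordiv_eq_ediv_of_pos (by omega)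
  rw [h10]; omega

theorem cless_neg (A : List Int) (C_digit : List Int) (flag : Bool) (i : Int)
    (count : List Int) (lc : Int) (hi : i < 0) :
    clessAux A C_digit flag i count lc = (count, lc) := by
  unfold clessAux
  rw [dif_neg (by omega)]

theorem cless_len_mono (A : List Int) (C_digit : List Int) (flag : Bool) (i : Int)
    (count : List Int) (lc : Int) :
    count.length ≤ (clessAux A C_digit flag i count lc).1.length := by
  unfold clessAux
  split_ifs with h1 h2
  · exact le_trans (by simp) (cless_len_mono A C_digit flag (i - 1) _ _)
  · exact le_trans (by simp) (cless_len_mono A C_digit flag (i - 1) _ _)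
  · simp
termination_by (i + 1).toNat
decreasing_by all_goals omega

theorem cless_pos (A : List Int) (C_digit : List Int) (flag : Bool) (i : Int)
    (count : List Int) (lc : Int) (hi : 0 ≤ i) :
    0 < (clessAux A C_digit flag i count lc).1.length := by
  have hlen : ∀ (x : Int), 0 < (count ++ [x]).length := by intro x; simp
  by_cases h2 : i = (C_digit.length : Int) - 1 <;>
    · unfold clessAux
      rw [dif_pos (show i ≥ 0 by omega)]
      first
        | rw [if_pos h2]
        | rw [if_neg h2]
      exact lt_of_lt_of_le (hlen _) (cless_len_mono A C_digit flag (i - 1) _ _)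

theorem cless_closed (A : List Int) (C_digit : List Int) (flag : Bool) (i : Int)
    (count : List Int) (lc : Int) :
    (clessAux A C_digit flag i count lc).1.foldl (fun acc k => acc * k) 1 =
      count.foldl (fun acc k => acc * k) 1 *
      (if i < 0 then 1
       else if 0 ≤ (C_digit.length : Int) - 1 ∧ (C_digit.length : Int) - 1 ≤ i then
         (lc + (A.countP (fun j =>
            decide (j < (PySem.List.pyGet? C_digit ((C_digit.length : Int) - 1)).getD 0 ∧
              (j ≠ 0 ∨ ¬ flag = true))) : Int)) * (A.length : Int) ^ i.toNat
       else (A.length : Int) ^ (i + 1).toNat) := by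
  by_cases h1 : i ≥ 0
  · by_cases h2 : i = (C_digit.length : Int) - 1
    · -- special position: i = len(C_digit) - 1 ≥ 0
      subst h2
      have hf : (fun (acc : Int) (j : Int) =>
          if j < (PySem.List.pyGet? C_digit ((C_digit.length : Int) - 1)).getD 0 ∧ j ≠ 0 ∧ flag = true then acc + 1
          else if j < (PySem.List.pyGet? C_digit ((C_digit.length : Int) - 1)).getD 0 ∧ ¬ flag = true then acc + 1
          else acc) =
          (fun (acc : Int) (j : Int) =>
            if j < (PySem.List.pyGet? C_digit ((C_digit.length : Int) - 1)).getD 0 ∧ (j ≠ 0 ∨ ¬ flag = true) then acc + 1 else acc) := by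
        funext acc j
        cases flag <;> by_cases hj1 : j < (PySem.List.pyGet? C_digit ((C_digit.length : Int) - 1)).getD 0 <;>
          by_cases hj2 : j = 0 <;> simp [hj1, hj2]
      unfold clessAux
      rw [dif_pos h1, if_pos rfl]
      simp only [hf, PySem.List.foldl_ite_add_one,
        cless_closed A C_digit flag ((C_digit.length : Int) - 1 - 1),
        List.foldl_append, List.foldl_cons, List.foldl_nil]
      rw [if_neg (show ¬ (C_digit.length : Int) - 1 < 0 by omega),
        if_pos (show 0 ≤ (C_digit.length : Int) - 1 ∧ (C_digit.length : Int) - 1 ≤ (C_digit.length : Int) - 1 by omega)]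
      by_cases h0 : (C_digit.length : Int) - 1 - 1 < 0
      · rw [if_pos h0]
        have hz : ((C_digit.length : Int) - 1).toNat = 0 := by omega
        rw [hz, pow_zero]
        ring
      · rw [if_neg h0,
          if_neg (show ¬ (0 ≤ (C_digit.length : Int) - 1 ∧ (C_digit.length : Int) - 1 ≤ (C_digit.length : Int) - 1 - 1) by omega)]
        have he : ((C_digit.length : Int) - 1 - 1 + 1).toNat = ((C_digit.length : Int) - 1).toNat := by omega
        rw [he]
        ring
    · -- non-special position, i ≥ 0 and i ≠ len(C_digit) - 1
      unfold clessAux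
      rw [dif_pos h1, if_neg h2]
      simp only [cless_closed A C_digit flag (i - 1),
        List.foldl_append, List.foldl_cons, List.foldl_nil]
      rw [if_neg (show ¬ i < 0 by omega)]
      by_cases hc : 0 ≤ (C_digit.length : Int) - 1 ∧ (C_digit.length : Int) - 1 ≤ i
      · -- the special position lies strictly below i
        rw [if_neg (show ¬ i - 1 < 0 by omega),
          if_pos (show 0 ≤ (C_digit.length : Int) - 1 ∧ (C_digit.length : Int) - 1 ≤ i - 1 by omega),
          if_pos hc]
        have he : i.toNat = (i - 1).toNat + 1 := by omega
        rw [he, pow_succ]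
        ring
      · rw [if_neg hc]
        by_cases h0 : i - 1 < 0
        · rw [if_pos h0]
          have he : (i + 1).toNat = 1 := by omega
          rw [he, pow_one]
          ring
        · rw [if_neg h0,
            if_neg (show ¬ (0 ≤ (C_digit.length : Int) - 1 ∧ (C_digit.length : Int) - 1 ≤ i - 1) by omega)]
          have he : (i + 1).toNat = (i - 1 + 1).toNat + 1 := by omega
          rw [he, pow_succ]
          ring
  · rw [cless_neg A C_digit flag i count lc (by omega), if_pos (show i < 0 by omega)]
    simp
termination_by (i + 1).toNat
decreasing_by all_goals omega

-- ===== VERDICT (by name: the statement is the Claim_ definition above) =====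
theorem combinationlessthan_spec : Claim_equal_combinationlessthan := by
  intro A i C_digit C _
  unfold Spec_combinationlessthan combinationlessthan combinationlessthan_alt numdigits
  simp only [gt_iff_lt]
  rw [numdigitsAux_fst]
  by_cases hi : i < 0
  · rw [cless_neg A C_digit _ i [] 0 hi]
    simp [hi]
  · have hp := cless_pos A C_digit (decide (countDigitsB C 0 = (C_digit.length : Int))) i [] 0 (by omega)
    rw [if_pos hp, cless_closed, if_neg hi, if_neg hi]
    simp only [List.foldl_nil, one_mul, zero_add]
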